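-- pv_equiv track=rewrite | github.com/jnoDestiny/Wheeler-Yuler | 479.py | geometric_series_sum
-- ===== SOURCE A (Python) =====
-- def geometric_series_sum(b, n, m):
--     T = 1
--     new_base = b % m
--     sum = 0
--     while n > 0:
--         if n & 1 == 1:
--             sum = (new_base * sum + T) % m
--         T = ((new_base + 1) * T) % m
--         new_base = (new_base * new_base) % m
--         n //= 2
--     return sum
-- ===== SOURCE B (Python) =====
-- def geometric_series_sum(b, n, m):
--     # Recursive divide-and-conquer: helper(k) = (sum of b^0..b^(k-1) mod m, b^k mod m)
--     def helper(k):
--         if k == 0: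
--             return (0, 1)
--         if k % 2 == 0:
--             s, p = helper(k // 2)
--             return (s * (1 + p) % m, p * p % m)
--         s, p = helper(k - 1)
--         return ((b * s + 1) % m, b * p % m)
--     if n <= 0:
--         return 0
--     return helper(n)[0]
-- ===== Notes on version B (the rewrite author's own statement) =====
-- stated objective: alternative
-- what changed: Replaces A's iterative LSB-first bit-scanning loop over mutable state (T, new_base, sum) with a recursive divide-and-conquer helper returning (partial sum mod m, power mod m) pairs.
-- outside the precondition, e.g. on geometric_series_sum(2, 0, 0): A raises ZeroDivisionError, B returns 0
import Mathlib
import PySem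

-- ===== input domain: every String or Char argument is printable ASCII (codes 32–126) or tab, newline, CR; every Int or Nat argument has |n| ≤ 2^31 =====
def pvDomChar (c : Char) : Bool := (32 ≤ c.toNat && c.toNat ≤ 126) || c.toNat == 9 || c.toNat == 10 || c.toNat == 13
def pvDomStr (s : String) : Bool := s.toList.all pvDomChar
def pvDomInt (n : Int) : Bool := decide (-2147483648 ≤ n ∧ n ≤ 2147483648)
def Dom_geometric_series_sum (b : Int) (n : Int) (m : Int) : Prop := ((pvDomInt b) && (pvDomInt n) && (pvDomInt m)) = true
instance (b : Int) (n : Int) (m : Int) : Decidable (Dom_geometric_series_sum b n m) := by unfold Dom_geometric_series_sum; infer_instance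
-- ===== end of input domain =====

-- B replaces A's iterative bit-scanning loop with a recursive divide-and-conquer helper (same asymptotic cost, different decomposition).


-- ===== PORT A =====
-- the while loop of A as a recursion over the state (T, new_base, sum, n)
def geometricLoopA (m nb T s n : Int) : Int :=
  if h : 0 < n then
    geometricLoopA m (PySem.Int.mod (nb * nb) m) (PySem.Int.mod ((nb + 1) * T) m)
      (if PySem.Int.band n 1 == 1 then PySem.Int.mod (nb * s + T) m else s)
      (PySem.Int.floordiv n 2)
  else s
termination_by n.toNat
decreasing_by
  rw [PySem.Int.floordiv_eq_ediv_of_pos (by norm_num)]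
  omega

def geometric_series_sum (b : Int) (n : Int) (m : Int) : Int :=
  geometricLoopA m (PySem.Int.mod b m) 1 0 n

-- ===== PORT B =====
-- helper(k) = (sum of b^0..b^(k-1) mod m, b^k mod m); only called with k > 0,
-- so carrying k as a Nat is exact for Python's positive k
def geometricHelperB (b m : Int) (k : Nat) : Int × Int :=
  if h : k = 0 then (0, 1)
  else if k % 2 == 0 then
    let p := geometricHelperB b m (k / 2)
    (PySem.Int.mod (p.1 * (1 + p.2)) m, PySem.Int.mod (p.2 * p.2) m)
  else
    let p := geometricHelperB b m (k - 1)
    (PySem.Int.mod (b * p.1 + 1) m, PySem.Int.mod (b * p.2) m)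
termination_by k
decreasing_by all_goals omega

def geometric_series_sum_alt (b : Int) (n : Int) (m : Int) : Int :=
  if n ≤ 0 then 0 else (geometricHelperB b m n.toNat).1

-- ===== PRECONDITION & SPEC =====
-- Pre_ excludes exactly m = 0, where Python A raises ZeroDivisionError (b % m before the loop).
def Pre_geometric_series_sum (b : Int) (n : Int) (m : Int) : Prop := m ≠ 0
instance (b : Int) (n : Int) (m : Int) : Decidable (Pre_geometric_series_sum b n m) := by unfold Pre_geometric_series_sum; infer_instance

def pvWitness_geometric_series_sum : Int × Int × Int := (2, 5, 7)

def Spec_geometric_series_sum (b : Int) (n : Int) (m : Int) (out : Int) : Prop := out = geometric_series_sum_alt b n m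
instance (b : Int) (n : Int) (m : Int) (out : Int) : Decidable (Spec_geometric_series_sum b n m out) := by unfold Spec_geometric_series_sum; infer_instance

-- ===== CLAIM (what is proved, stated in full; the proofs are below) =====
def Claim_equal_geometric_series_sum : Prop := ∀ (b : Int) (n : Int) (m : Int), Dom_geometric_series_sum b n m → Pre_geometric_series_sum b n m → Spec_geometric_series_sum b n m (geometric_series_sum b n m)


-- ===== LEMMAS AND PROOFS =====

-- the mathematical geometric series sum: gs x k = x^0 + x^1 + … + x^(k-1)
def gs (x : Int) : Nat → Int
  | 0 => 0
  | k+1 => 1 + x * gs x k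

lemma gs_succ' (x : Int) (k : Nat) : gs x (k+1) = gs x k + x ^ k := by
  induction k with
  | zero => simp [gs]
  | succ k ih =>
      calc gs x (k+1+1) = 1 + x * gs x (k+1) := rfl
        _ = 1 + x * (gs x k + x ^ k) := by rw [ih]
        _ = (1 + x * gs x k) + x ^ (k+1) := by ring
        _ = gs x (k+1) + x ^ (k+1) := rfl

lemma gs_add (x : Int) (j k : Nat) : gs x (j + k) = gs x j + x ^ j * gs x k := by
  induction k with
  | zero => simp [gs]
  | succ k ih =>
      rw [show j + (k+1) = (j+k)+1 from rfl, gs_succ', ih, gs_succ', pow_add]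
      ring

lemma gs_even (x : Int) (k : Nat) : gs x (2 * k) = (1 + x) * gs (x * x) k := by
  induction k with
  | zero => simp [gs]
  | succ k ih =>
      rw [show 2 * (k+1) = (2*k+1)+1 from by ring]
      show 1 + x * gs x (2*k+1) = _
      show _ = (1 + x) * (1 + (x*x) * gs (x*x) k)
      rw [show (2*k+1 : Nat) = (2*k)+1 from rfl]
      show 1 + x * (1 + x * gs x (2*k)) = _
      rw [ih]; ring

lemma gs_odd' (x : Int) (k : Nat) : gs x (2 * k + 1) = x ^ (2 * k) + (1 + x) * gs (x * x) k := by
  rw [gs_succ', gs_even]; ring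

lemma gs_double (x : Int) (k : Nat) : gs x (k + k) = (1 + x ^ k) * gs x k := by
  rw [gs_add]; ring

-- x % m is congruent to x (Python floor-mod)
lemma pymod_modEq (x m : Int) : PySem.Int.mod x m ≡ x [ZMOD m] := by
  have h := PySem.Int.floordiv_mul_add_mod x m
  exact Int.modEq_iff_dvd.2 ⟨PySem.Int.floordiv x m, by linarith [mul_comm m (PySem.Int.floordiv x m)]⟩

lemma pymod_zero_right (x : Int) : PySem.Int.mod x 0 = x := by
  have h := PySem.Int.floordiv_mul_add_mod x 0
  omega

-- congruent values have the same Python floor-mod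
lemma pymod_congr {x y m : Int} (h : x ≡ y [ZMOD m]) : PySem.Int.mod x m = PySem.Int.mod y m := by
  rcases eq_or_ne m 0 with rfl | hm
  · rw [pymod_zero_right, pymod_zero_right]
    simpa [Int.ModEq] using h
  · have hd : m ∣ (PySem.Int.mod y m - PySem.Int.mod x m) :=
      (((pymod_modEq x m).trans h).trans (pymod_modEq y m).symm).dvd
    have h0 : PySem.Int.mod y m - PySem.Int.mod x m = 0 := by
      rcases lt_or_gt_of_ne hm with hneg | hpos
      · refine Int.eq_zero_of_abs_lt_dvd (Int.neg_dvd.2 hd) ?_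
        have b1 : m < PySem.Int.mod x m ∧ PySem.Int.mod x m ≤ 0 := PySem.Int.mod_neg_bounds x hneg
        have b2 : m < PySem.Int.mod y m ∧ PySem.Int.mod y m ≤ 0 := PySem.Int.mod_neg_bounds y hneg
        rw [abs_lt]; omega
      · refine Int.eq_zero_of_abs_lt_dvd hd ?_
        have b1 : 0 ≤ PySem.Int.mod x m := PySem.Int.mod_nonneg x hpos
        have b2 : PySem.Int.mod x m < m := PySem.Int.mod_lt x hpos
        have b3 : 0 ≤ PySem.Int.mod y m := PySem.Int.mod_nonneg y hpos
        have b4 : PySem.Int.mod y m < m := PySem.Int.mod_lt y hpos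
        rw [abs_lt]; omega
    omega

lemma modEq_of_eq {m a b : Int} (h : a = b) : a ≡ b [ZMOD m] := by rw [h]

lemma gs_modEq {x y m : Int} (h : x ≡ y [ZMOD m]) (k : Nat) : gs x k ≡ gs y k [ZMOD m] := by
  induction k with
  | zero => rfl
  | succ k ih => exact Int.ModEq.add_left 1 (h.mul ih)

-- A's loop computes the canonical residue of nb^n * s + gs nb n * T
lemma geometricLoopA_eq (m : Int) (K : Nat) : ∀ n : Int, n.toNat ≤ K → 0 < n → ∀ nb T s,
    geometricLoopA m nb T s n = PySem.Int.mod (nb ^ n.toNat * s + gs nb n.toNat * T) m := by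
  induction K with
  | zero => intro n hK hn; omega
  | succ K ih =>
      intro n hK hn nb T s
      rw [geometricLoopA, dif_pos hn]
      have hfd : PySem.Int.floordiv n 2 = n / 2 :=
        PySem.Int.floordiv_eq_ediv_of_pos (by norm_num)
      have hband : PySem.Int.band n 1 = PySem.Int.mod n 2 := PySem.Int.band_one n
      have hmod2 : PySem.Int.mod n 2 = n % 2 :=
        PySem.Int.mod_eq_emod_of_pos (by norm_num)
      by_cases h1 : n = 1
      · subst h1
        rw [hfd, show (1:Int)/2 = 0 from rfl, geometricLoopA, dif_neg (by omega)]
        rw [if_pos (by decide)]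
        refine pymod_congr (modEq_of_eq ?_)
        show nb * s + T = nb ^ 1 * s + gs nb 1 * T
        simp [gs]
      · -- n ≥ 2: apply ih to the recursive call
        have hn2 : 0 < n / 2 := by omega
        have hk : (n / 2).toNat ≤ K := by omega
        rw [hfd, ih (n / 2) hk hn2]
        set k' := (n / 2).toNat with hk'
        have hnb' : PySem.Int.mod (nb * nb) m ≡ nb * nb [ZMOD m] := pymod_modEq _ m
        have hT' : PySem.Int.mod ((nb + 1) * T) m ≡ (nb + 1) * T [ZMOD m] := pymod_modEq _ m
        by_cases hpar : n % 2 = 1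
        · -- odd: n.toNat = 2*k' + 1
          have hkeq : n.toNat = 2 * k' + 1 := by omega
          rw [if_pos (by simp [hband, hpar])]
          refine pymod_congr (Int.ModEq.trans
            (((hnb'.pow k').mul (pymod_modEq (nb * s + T) m)).add ((gs_modEq hnb' k').mul hT'))
            (modEq_of_eq ?_))
          rw [hkeq, gs_odd', show 2 * k' = k' * 2 from by ring, pow_mul]
          ring
        · -- even: n.toNat = 2*k'
          have hkeq : n.toNat = 2 * k' := by omega
          rw [if_neg (by simp [hband]; omega)]
          refine pymod_congr (Int.ModEq.trans
            (((hnb'.pow k').mul (Int.ModEq.refl s)).add ((gs_modEq hnb' k').mul hT'))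
            (modEq_of_eq ?_))
          rw [hkeq, gs_even, show 2 * k' = k' * 2 from by ring, pow_mul]
          ring

-- B's helper computes the canonical residues of gs b k and b^k
lemma geometricHelperB_eq (b m : Int) (K : Nat) : ∀ k : Nat, k ≤ K → 0 < k →
    geometricHelperB b m k = (PySem.Int.mod (gs b k) m, PySem.Int.mod (b ^ k) m) := by
  induction K with
  | zero => intro k hK hk; omega
  | succ K ih =>
      intro k hK hk
      rw [geometricHelperB, dif_neg (by omega)]
      by_cases hpar : k % 2 = 0
      · rw [if_pos (by simp [hpar])]
        have hk2 : 0 < k / 2 := by omega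
        rw [ih (k / 2) (by omega) hk2]
        have hs := pymod_modEq (gs b (k / 2)) m
        have hp := pymod_modEq (b ^ (k / 2)) m
        have hkeq : k = k / 2 + k / 2 := by omega
        refine Prod.ext ?_ ?_
        · refine pymod_congr (Int.ModEq.trans (hs.mul (Int.ModEq.add_left 1 hp)) (modEq_of_eq ?_))
          conv_rhs => rw [hkeq, gs_double]
          ring
        · refine pymod_congr (Int.ModEq.trans (hp.mul hp) (modEq_of_eq ?_))
          conv_rhs => rw [hkeq, pow_add]
      · rw [if_neg (by simp [hpar])]
        rcases Nat.exists_eq_succ_of_ne_zero (by omega : k ≠ 0) with ⟨j, rfl⟩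
        rw [show j.succ - 1 = j from rfl]
        by_cases hj : j = 0
        · subst hj
          simp [geometricHelperB, gs]
        · rw [ih j (by omega) (by omega)]
          have hs := pymod_modEq (gs b j) m
          have hp := pymod_modEq (b ^ j) m
          refine Prod.ext ?_ ?_
          · refine pymod_congr (Int.ModEq.trans (Int.ModEq.add_right 1 ((Int.ModEq.refl b).mul hs)) (modEq_of_eq ?_))
            show b * gs b j + 1 = gs b (j + 1)
            simp [gs]; ring
          · refine pymod_congr (Int.ModEq.trans ((Int.ModEq.refl b).mul hp) (modEq_of_eq ?_))
            rw [pow_succ]; ring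

-- ===== VERDICT (by name: the statement is the Claim_ definition above) =====
theorem geometric_series_sum_spec : Claim_equal_geometric_series_sum := by
  intro b n m _ hm
  unfold Spec_geometric_series_sum geometric_series_sum geometric_series_sum_alt
  by_cases hn : n ≤ 0
  · rw [geometricLoopA, dif_neg (by omega), if_pos hn]
  · rw [if_neg hn,
      geometricLoopA_eq m n.toNat n le_rfl (by omega),
      geometricHelperB_eq b m n.toNat n.toNat le_rfl (by omega)]
    refine pymod_congr ?_
    calc PySem.Int.mod b m ^ n.toNat * 0 + gs (PySem.Int.mod b m) n.toNat * 1
        = gs (PySem.Int.mod b m) n.toNat := by ring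
      _ ≡ gs b n.toNat [ZMOD m] := gs_modEq (pymod_modEq b m) n.toNat
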